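-- pv_equiv track=rewrite | github.com/kinase2741/atcoder_submission | agc043/a/main.py | solve
-- ===== SOURCE A (Python) =====
-- def solve(h,w,board):
--     dp = [[0]*w for _ in range(h)]
--     def isSharp(y,x):
--         return board[y][x] == '#'
--     for y in range(h):
--         if y == 0:
--             dp[0][0] = isSharp(0,0)
--         else:
--             dp[y][0] = dp[y-1][0] + isSharp(y,0)
--         for x in range(w-1):
--             if y == 0:
--                 dp[y][x+1] = dp[y][x] + isSharp(y,x+1)
--             else:
--                 dp[y][x+1] = min(dp[y][x], dp[y-1][x+1]) + isSharp(y,x+1)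
--
--
--     return dp[-1][-1]
-- ===== SOURCE B (Python) =====
-- def solve(h, w, board):
--     # Top-down memoized recursion instead of A's bottom-up 2D table.
--     memo = {}
--
--     def cost(y, x):
--         if (y, x) in memo:
--             return memo[(y, x)]
--         if y == 0 and x == 0:
--             v = board[0][0] == '#'
--         elif y == 0:
--             v = cost(0, x - 1) + (board[0][x] == '#')
--         elif x == 0:
--             v = cost(y - 1, 0) + (board[y][0] == '#')
--         else:
--             v = min(cost(y, x - 1), cost(y - 1, x)) + (board[y][x] == '#')
--         memo[(y, x)] = v
--         return v
--
--     return cost(h - 1, w - 1)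
-- ===== Notes on version B (the rewrite author's own statement) =====
-- stated objective: alternative
-- what changed: Replaces A's bottom-up row-by-row 2D DP table with top-down memoized recursion on (y,x): a helper cost(y,x) computes the same min recurrence on demand, caching results in a dict, and the answer is cost(h-1,w-1).
-- outside the precondition, e.g. on solve(1, 1, ['#']): A returns True, B returns True
import Mathlib
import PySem

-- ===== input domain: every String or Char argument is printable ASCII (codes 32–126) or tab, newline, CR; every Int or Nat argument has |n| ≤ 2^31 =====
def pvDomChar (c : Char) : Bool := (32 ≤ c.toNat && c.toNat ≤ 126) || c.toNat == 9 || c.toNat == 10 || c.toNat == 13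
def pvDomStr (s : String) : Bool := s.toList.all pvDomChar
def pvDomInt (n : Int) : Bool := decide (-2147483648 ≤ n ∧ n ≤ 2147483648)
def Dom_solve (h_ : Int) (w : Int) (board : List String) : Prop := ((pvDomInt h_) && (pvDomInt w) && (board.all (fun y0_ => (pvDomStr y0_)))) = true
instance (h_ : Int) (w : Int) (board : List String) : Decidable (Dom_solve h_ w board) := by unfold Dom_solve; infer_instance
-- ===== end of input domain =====

-- B replaces A's bottom-up row-by-row 2D table with top-down memoized recursion cost(y,x); equal answers on Pre_.

-- ===== PORT A =====
-- board[y][x] == '#' as 0/1; total via defaults, exact under Pre_ (indices in range there; Python raises out of range).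
def isSharpA (board : List String) (y x : Nat) : Int :=
  if ((board.getD y "").toList.getD x ' ') = '#' then 1 else 0

-- dp[y][x] read / dp[y][x] = v write on the list-of-lists table; exact under Pre_ (in range).
def get2 (dp : List (List Int)) (y x : Nat) : Int := (dp.getD y []).getD x 0
def set2 (dp : List (List Int)) (y x : Nat) (v : Int) : List (List Int) :=
  dp.modify y (fun row => row.set x v)

def solve (h_ : Int) (w : Int) (board : List String) : Int :=
  let H := h_.toNat  -- range(h): empty for h ≤ 0
  let W := w.toNat   -- [0]*w: empty for w ≤ 0
  let dp0 : List (List Int) := List.replicate H (List.replicate W 0)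
  let dp := (List.range H).foldl (fun dp y =>
    let dp1 := if y = 0 then set2 dp 0 0 (isSharpA board 0 0)
               else set2 dp y 0 (get2 dp (y-1) 0 + isSharpA board y 0)
    (List.range (W-1)).foldl (fun dp x =>
      if y = 0 then set2 dp y (x+1) (get2 dp y x + isSharpA board y (x+1))
      else set2 dp y (x+1) (min (get2 dp y x) (get2 dp (y-1) (x+1)) + isSharpA board y (x+1))) dp1) dp0
  -- return dp[-1][-1]; none = IndexError, excluded by Pre_
  match PySem.List.pyGet? dp (-1) with
  | none => 0
  | some row => (PySem.List.pyGet? row (-1)).getD 0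

-- ===== PORT B =====
-- cost(y,x) with the memo dict threaded through the recursion; under Pre_ the arguments
-- h-1, w-1 are nonnegative, so the Python ints y, x are ported as Nat (structural recursion).
def costB (board : List String) : Nat → Nat → PySem.Dict (Nat × Nat) Int → Int × PySem.Dict (Nat × Nat) Int
  | y, x, memo =>
    match PySem.Dict.get? memo (y, x) with
    | some v => (v, memo)
    | none =>
      match y, x with
      | 0, 0 =>
        let v := isSharpA board 0 0
        (v, memo.insert (0, 0) v)
      | 0, x+1 =>
        let p := costB board 0 x memo
        let v := p.1 + isSharpA board 0 (x+1)
        (v, p.2.insert (0, x+1) v)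
      | y+1, 0 =>
        let p := costB board y 0 memo
        let v := p.1 + isSharpA board (y+1) 0
        (v, p.2.insert (y+1, 0) v)
      | y+1, x+1 =>
        let p := costB board (y+1) x memo
        let q := costB board y (x+1) p.2
        let v := min p.1 q.1 + isSharpA board (y+1) (x+1)
        (v, q.2.insert (y+1, x+1) v)
  termination_by y x _ => y + x

def solve_alt (h_ : Int) (w : Int) (board : List String) : Int :=
  (costB board (h_ - 1).toNat (w - 1).toNat PySem.Dict.empty).1

-- ===== PRECONDITION & SPEC =====
-- Pre_ = the inputs on which A returns an int: at least one row and column, board supplies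
-- h rows each of length ≥ w (otherwise A raises IndexError); the 1x1 board is excluded
-- because there A (and B) return a Python bool rather than an int.
def Pre_solve (h_ : Int) (w : Int) (board : List String) : Prop :=
  1 ≤ h_ ∧ 1 ≤ w ∧ h_.toNat ≤ board.length ∧
    (∀ s ∈ board.take h_.toNat, w.toNat ≤ s.length) ∧ ¬(h_ = 1 ∧ w = 1)
instance (h_ : Int) (w : Int) (board : List String) : Decidable (Pre_solve h_ w board) := by unfold Pre_solve; infer_instance

def pvWitness_solve : Int × Int × List String := (2, 3, ["#.#", "..#"])

def Spec_solve (h_ : Int) (w : Int) (board : List String) (out : Int) : Prop := out = solve_alt h_ w board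
instance (h_ : Int) (w : Int) (board : List String) (out : Int) : Decidable (Spec_solve h_ w board out) := by unfold Spec_solve; infer_instance

-- ===== CLAIM (what is proved, stated in full; the proofs are below) =====
def Claim_equal_solve : Prop := ∀ (h_ : Int) (w : Int) (board : List String), Dom_solve h_ w board → Pre_solve h_ w board → Spec_solve h_ w board (solve h_ w board)

-- ===== LEMMAS AND PROOFS =====

-- the min-path cost recurrence that both programs compute
def cost (s : Nat → Nat → Int) : Nat → Nat → Int
  | 0, 0 => s 0 0
  | 0, x+1 => cost s 0 x + s 0 (x+1)
  | y+1, 0 => cost s y 0 + s (y+1) 0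
  | y+1, x+1 => min (cost s (y+1) x) (cost s y (x+1)) + s (y+1) (x+1)

theorem cost_zero_zero (s : Nat → Nat → Int) : cost s 0 0 = s 0 0 := by simp [cost]
theorem cost_zero_succ (s : Nat → Nat → Int) (x : Nat) :
    cost s 0 (x+1) = cost s 0 x + s 0 (x+1) := by simp [cost]
theorem cost_succ_zero (s : Nat → Nat → Int) (y : Nat) :
    cost s (y+1) 0 = cost s y 0 + s (y+1) 0 := by simp [cost]
theorem cost_succ_succ (s : Nat → Nat → Int) (y x : Nat) :
    cost s (y+1) (x+1) = min (cost s (y+1) x) (cost s y (x+1)) + s (y+1) (x+1) := by simp [cost]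

-- dimensions of A's table
def Dims (H W : Nat) (dp : List (List Int)) : Prop :=
  dp.length = H ∧ ∀ i, i < H → (dp.getD i []).length = W

theorem row_set2 (dp : List (List Int)) (y x : Nat) (v : Int) (i : Nat) :
    (set2 dp y x v).getD i [] = if y = i then (dp.getD i []).set x v else dp.getD i [] := by
  simp only [set2, List.getD_eq_getElem?_getD, List.getElem?_modify]
  cases h : dp[i]? with
  | none => split <;> simp
  | some row => by_cases hyi : y = i <;> simp [hyi]

theorem dims_set2 {H W : Nat} {dp : List (List Int)} (hd : Dims H W dp) (y x : Nat) (v : Int) :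
    Dims H W (set2 dp y x v) := by
  obtain ⟨h1, h2⟩ := hd
  refine ⟨by simpa [set2, List.length_modify] using h1, fun i hi => ?_⟩
  rw [row_set2]
  split
  · rw [List.length_set]; exact h2 i hi
  · exact h2 i hi

theorem get2_set2_self {H W : Nat} {dp : List (List Int)} (hd : Dims H W dp) {y x : Nat}
    (hy : y < H) (hx : x < W) (v : Int) : get2 (set2 dp y x v) y x = v := by
  unfold get2
  rw [row_set2, if_pos rfl, List.getD_eq_getElem?_getD, List.getElem?_set, if_pos rfl,
    if_pos (by rw [hd.2 y hy]; exact hx)]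
  rfl

theorem get2_set2_ne {dp : List (List Int)} {y x i x' : Nat} (h : y ≠ i ∨ x ≠ x') (v : Int) :
    get2 (set2 dp y x v) i x' = get2 dp i x' := by
  unfold get2
  rw [row_set2]
  by_cases hyi : y = i
  · have hx : x ≠ x' := by tauto
    simp [hyi, List.getD_eq_getElem?_getD, hx]
  · simp [hyi]

-- ---- A side: the nested fold fills the table with cost values ----

theorem foldA_inner (board : List String) (H W y : Nat) (hy : y < H) (dp : List (List Int))
    (hd : Dims H W dp)
    (hprev : ∀ i x', i < y → x' < W → get2 dp i x' = cost (isSharpA board) i x')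
    (hhead : get2 dp y 0 = cost (isSharpA board) y 0) :
    ∀ n, n ≤ W - 1 →
      Dims H W ((List.range n).foldl (fun dp x =>
          if y = 0 then set2 dp y (x+1) (get2 dp y x + isSharpA board y (x+1))
          else set2 dp y (x+1) (min (get2 dp y x) (get2 dp (y-1) (x+1)) + isSharpA board y (x+1))) dp) ∧
      (∀ i x', i < y → x' < W →
        get2 ((List.range n).foldl (fun dp x =>
          if y = 0 then set2 dp y (x+1) (get2 dp y x + isSharpA board y (x+1))
          else set2 dp y (x+1) (min (get2 dp y x) (get2 dp (y-1) (x+1)) + isSharpA board y (x+1))) dp) i x'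
          = cost (isSharpA board) i x') ∧
      (∀ x', x' ≤ n →
        get2 ((List.range n).foldl (fun dp x =>
          if y = 0 then set2 dp y (x+1) (get2 dp y x + isSharpA board y (x+1))
          else set2 dp y (x+1) (min (get2 dp y x) (get2 dp (y-1) (x+1)) + isSharpA board y (x+1))) dp) y x'
          = cost (isSharpA board) y x') := by
  intro n
  induction n with
  | zero =>
    intro _
    rw [List.range_zero, List.foldl_nil]
    exact ⟨hd, hprev, fun x' hx' => by
      have hx0 : x' = 0 := by omega
      subst hx0; exact hhead⟩
  | succ n ih =>
    intro hn
    have hn' : n ≤ W - 1 := by omega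
    obtain ⟨d, p, c⟩ := ih hn'
    have hW : n + 1 < W := by omega
    have hnW : n < W := by omega
    rw [List.range_succ, List.foldl_append, List.foldl_cons, List.foldl_nil]
    set F := (List.range n).foldl (fun dp x =>
          if y = 0 then set2 dp y (x+1) (get2 dp y x + isSharpA board y (x+1))
          else set2 dp y (x+1) (min (get2 dp y x) (get2 dp (y-1) (x+1)) + isSharpA board y (x+1))) dp with hF
    have hval : (if y = 0 then get2 F y n + isSharpA board y (n+1)
        else min (get2 F y n) (get2 F (y-1) (n+1)) + isSharpA board y (n+1))
        = cost (isSharpA board) y (n+1) := by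
      by_cases hy0 : y = 0
      · subst hy0
        rw [if_pos rfl, c n (by omega), cost_zero_succ]
      · obtain ⟨m, rfl⟩ : ∃ m, y = m + 1 := ⟨y - 1, by omega⟩
        rw [if_neg hy0]
        simp only [Nat.add_sub_cancel]
        rw [c n (by omega), p m (n+1) (by omega) hW, cost_succ_succ]
    split
    all_goals rename_i hy0
    · subst hy0
      refine ⟨dims_set2 d _ _ _, fun i x' hi _ => by omega, fun x' hx' => ?_⟩
      by_cases hx1 : x' = n + 1
      · subst hx1
        rw [get2_set2_self d hy hW]
        rw [if_pos rfl] at hval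
        exact hval
      · rw [get2_set2_ne (Or.inr (by omega))]
        exact c x' (by omega)
    · refine ⟨dims_set2 d _ _ _, fun i x' hi hx' => ?_, fun x' hx' => ?_⟩
      · rw [get2_set2_ne (Or.inl (by omega))]
        exact p i x' hi hx'
      · by_cases hx1 : x' = n + 1
        · subst hx1
          rw [get2_set2_self d hy hW]
          rw [if_neg hy0] at hval
          exact hval
        · rw [get2_set2_ne (Or.inr (by omega))]
          exact c x' (by omega)

-- the outer loop body of A, named for the proofs (definitionally the lambda in `solve`)
def rowA (board : List String) (W : Nat) (dp : List (List Int)) (y : Nat) : List (List Int) :=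
  let dp1 := if y = 0 then set2 dp 0 0 (isSharpA board 0 0)
             else set2 dp y 0 (get2 dp (y-1) 0 + isSharpA board y 0)
  (List.range (W-1)).foldl (fun dp x =>
    if y = 0 then set2 dp y (x+1) (get2 dp y x + isSharpA board y (x+1))
    else set2 dp y (x+1) (min (get2 dp y x) (get2 dp (y-1) (x+1)) + isSharpA board y (x+1))) dp1

theorem solve_eq (h_ w : Int) (board : List String) :
    solve h_ w board =
      match PySem.List.pyGet? ((List.range h_.toNat).foldl (rowA board w.toNat)
          (List.replicate h_.toNat (List.replicate w.toNat 0))) (-1) with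
      | none => 0
      | some row => (PySem.List.pyGet? row (-1)).getD 0 := rfl

theorem foldA_outer (board : List String) (H W : Nat) (hW : 1 ≤ W) :
    ∀ n, n ≤ H →
      Dims H W ((List.range n).foldl (rowA board W) (List.replicate H (List.replicate W 0))) ∧
      ∀ i x, i < n → x < W →
        get2 ((List.range n).foldl (rowA board W) (List.replicate H (List.replicate W 0))) i x
          = cost (isSharpA board) i x := by
  intro n
  induction n with
  | zero =>
    intro _
    refine ⟨⟨by simp, fun i hi => ?_⟩, fun i x hi => by omega⟩
    rw [List.range_zero, List.foldl_nil, List.getD_eq_getElem?_getD, List.getElem?_replicate,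
      if_pos hi]
    simp
  | succ n ih =>
    intro hn
    obtain ⟨d, inv⟩ := ih (by omega)
    have hnH : n < H := by omega
    rw [List.range_succ, List.foldl_append, List.foldl_cons, List.foldl_nil]
    set G := (List.range n).foldl (rowA board W) (List.replicate H (List.replicate W 0)) with hG
    unfold rowA
    set dp1 := if n = 0 then set2 G 0 0 (isSharpA board 0 0)
             else set2 G n 0 (get2 G (n-1) 0 + isSharpA board n 0) with hdp1
    have d1 : Dims H W dp1 := by
      rw [hdp1]; split <;> exact dims_set2 d _ _ _
    have p1 : ∀ i x', i < n → x' < W → get2 dp1 i x' = cost (isSharpA board) i x' := by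
      intro i x' hi hx'
      rw [hdp1]
      split
      · omega
      · rw [get2_set2_ne (Or.inl (by omega))]
        exact inv i x' hi hx'
    have h1 : get2 dp1 n 0 = cost (isSharpA board) n 0 := by
      rw [hdp1]
      by_cases hn0 : n = 0
      · subst hn0
        rw [if_pos rfl, get2_set2_self d (by omega) (by omega), cost_zero_zero]
      · obtain ⟨m, rfl⟩ : ∃ m, n = m + 1 := ⟨n - 1, by omega⟩
        rw [if_neg hn0, get2_set2_self d hnH (by omega)]
        simp only [Nat.add_sub_cancel]
        rw [inv m 0 (by omega) (by omega), cost_succ_zero]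
    obtain ⟨d', p', c'⟩ := foldA_inner board H W n hnH dp1 d1 p1 h1 (W-1) le_rfl
    refine ⟨d', fun i x hi hx => ?_⟩
    by_cases hin : i = n
    · subst hin
      exact c' x (by omega)
    · exact p' i x (by omega) hx

-- ---- B side: the memoized recursion computes cost, preserving the memo invariant ----

-- every cached value is the true cost of its cell
def MemoOK (board : List String) (memo : PySem.Dict (Nat × Nat) Int) : Prop :=
  ∀ k v, memo.get? k = some v → v = cost (isSharpA board) k.1 k.2

theorem memoOK_empty (board : List String) : MemoOK board PySem.Dict.empty := by
  intro k v h
  rw [PySem.Dict.get?_empty] at h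
  exact absurd h (by simp)

theorem memoOK_insert {board : List String} {memo : PySem.Dict (Nat × Nat) Int}
    (h : MemoOK board memo) (y x : Nat) :
    MemoOK board (memo.insert (y, x) (cost (isSharpA board) y x)) := by
  intro k v hk
  rw [PySem.Dict.get?_insert] at hk
  split at hk
  · rename_i hke
    subst hke
    exact (Option.some.injEq _ _ ▸ hk).symm
  · exact h k v hk

theorem costB_correct (board : List String) :
    ∀ y x memo, MemoOK board memo →
      (costB board y x memo).1 = cost (isSharpA board) y x ∧
      MemoOK board (costB board y x memo).2 := by
  intro y x
  induction hyx : y + x using Nat.strong_induction_on generalizing y x with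
  | _ n ih =>
  subst hyx
  intro memo hm
  rw [costB.eq_def]
  cases hg : PySem.Dict.get? memo (y, x) with
  | some v =>
    simp only [hg]
    exact ⟨hm (y, x) v hg, hm⟩
  | none =>
    simp only [hg]
    match y, x with
    | 0, 0 =>
      refine ⟨by rw [cost_zero_zero], ?_⟩
      simpa [cost_zero_zero] using memoOK_insert hm 0 0
    | 0, x+1 =>
      obtain ⟨hv, hm'⟩ := ih (0 + x) (by omega) 0 x rfl memo hm
      refine ⟨by dsimp only; rw [hv, cost_zero_succ], ?_⟩
      dsimp only
      rw [hv]
      simpa [cost_zero_succ] using memoOK_insert hm' 0 (x+1)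
    | y+1, 0 =>
      obtain ⟨hv, hm'⟩ := ih (y + 0) (by omega) y 0 rfl memo hm
      refine ⟨by dsimp only; rw [hv, cost_succ_zero], ?_⟩
      dsimp only
      rw [hv]
      simpa [cost_succ_zero] using memoOK_insert hm' (y+1) 0
    | y+1, x+1 =>
      obtain ⟨hv1, hm1⟩ := ih ((y+1) + x) (by omega) (y+1) x rfl memo hm
      obtain ⟨hv2, hm2⟩ := ih (y + (x+1)) (by omega) y (x+1) rfl _ hm1
      refine ⟨by dsimp only; rw [hv1, hv2, cost_succ_succ], ?_⟩
      dsimp only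
      rw [hv1, hv2]
      simpa [cost_succ_succ] using memoOK_insert hm2 (y+1) (x+1)

theorem solve_alt_cost (h_ w : Int) (board : List String) (hh : 1 ≤ h_) (hw : 1 ≤ w) :
    solve_alt h_ w board = cost (isSharpA board) (h_.toNat - 1) (w.toNat - 1) := by
  unfold solve_alt
  have h1 : (h_ - 1).toNat = h_.toNat - 1 := by omega
  have h2 : (w - 1).toNat = w.toNat - 1 := by omega
  rw [h1, h2]
  exact (costB_correct board _ _ PySem.Dict.empty (memoOK_empty board)).1

-- ===== VERDICT (by name: the statement is the Claim_ definition above) =====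
theorem solve_spec : Claim_equal_solve := by
  intro h_ w board _ hpre
  obtain ⟨hh, hw, _, _, _⟩ := hpre
  unfold Spec_solve
  rw [solve_eq, solve_alt_cost h_ w board hh hw]
  obtain ⟨⟨hlen, hrow⟩, hval⟩ := foldA_outer board h_.toNat w.toNat (by omega) h_.toNat le_rfl
  set dp := (List.range h_.toNat).foldl (rowA board w.toNat)
    (List.replicate h_.toNat (List.replicate w.toNat 0)) with hdp
  have hH : h_.toNat - 1 < dp.length := by omega
  have hget : PySem.List.pyGet? dp (-1) = some dp[h_.toNat - 1] := by
    rw [PySem.List.pyGet?_neg_one, List.getLast?_eq_getElem?, hlen, List.getElem?_eq_getElem hH]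
  rw [hget]
  dsimp only
  have hrowD : dp.getD (h_.toNat - 1) [] = dp[h_.toNat - 1] := by
    rw [List.getD_eq_getElem?_getD, List.getElem?_eq_getElem hH]
    rfl
  have hrlen : dp[h_.toNat - 1].length = w.toNat := by
    rw [← hrowD]
    exact hrow (h_.toNat - 1) (by omega)
  have hW : w.toNat - 1 < dp[h_.toNat - 1].length := by omega
  have hget2 : PySem.List.pyGet? dp[h_.toNat - 1] (-1) = some (dp[h_.toNat - 1][w.toNat - 1]) := by
    rw [PySem.List.pyGet?_neg_one, List.getLast?_eq_getElem?, hrlen, List.getElem?_eq_getElem hW]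
  have := hval (h_.toNat - 1) (w.toNat - 1) (by omega) (by omega)
  unfold get2 at this
  rw [hrowD, List.getD_eq_getElem?_getD, List.getElem?_eq_getElem hW] at this
  rw [hget2]
  exact this
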